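-- pv_equiv track=rewrite | github.com/newmemba/KecerdasanBuatan | bagian1.py | prediksi_risiko
-- ===== SOURCE A (Python) =====
-- def prediksi_risiko(gejala):
--
--     aturan = [
--         {
--             "kondisi": {"insomnia", "kelelahan", "sulit_konsentrasi"},
--             "kesimpulan": "risiko_stres_akademik",
--             "deskripsi": "Stres Akademik Tinggi",
--             "rekomendasi": "Istirahat cukup, atur jadwal belajar, bicarakan dengan dosen atau teman"
--         },
--         {
--             "kondisi": {"serangan_cemas", "menghindar", "kelelahan"},
--             "kesimpulan": "risiko_gangguan_kecemasan",
--             "deskripsi": "Gangguan Kecemasan",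
--             "rekomendasi": "Latihan pernapasan, kurangi kafein, pertimbangkan konsultasi psikolog"
--         },
--         {
--             "kondisi": {"sedih", "kehilangan_minat", "perubahan_nafsu_makan", "tidak_berharga"},
--             "kesimpulan": "risiko_depresi",
--             "deskripsi": "Depresi Ringan-Sedang",
--             "rekomendasi": "Cari dukungan sosial, pertahankan rutinitas sehat, pertimbangkan konseling"
--         },
--         {
--             "kondisi": {"pikiran_kematian", "tidak_berharga", "sedih"},
--             "kesimpulan": "risiko_depresi_berat",
--             "deskripsi": "Depresi Berat (Segera cari bantuan profesional)",
--             "rekomendasi": "Segera hubungi psikolog/psikiater atau layanan darurat kesehatan mental"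
--         },
--         {
--             "kondisi": {"risiko_stres_akademik", "risiko_gangguan_kecemasan"},
--             "kesimpulan": "risiko_burnout",
--             "deskripsi": "Risiko Burnout Akademik",
--             "rekomendasi": "Evaluasi beban studi, ambil cuti jika perlu, cari dukungan kampus"
--         }
--     ]
--
--
--     fakta = gejala.copy()
--     perubahan = True
--     hasil_prediksi = []
--     while perubahan:
--         perubahan = False
--         for rule in aturan:
--             if rule["kondisi"].issubset(fakta) and rule["kesimpulan"] not in fakta:
--                 fakta.add(rule["kesimpulan"])
--                 hasil_prediksi.append({
--                     "jenis": rule["deskripsi"],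
--                     "rekomendasi": rule["rekomendasi"]})
--                 perubahan = True
--     if not hasil_prediksi:
--         hasil_prediksi.append({
--             "jenis": "Tidak terdeteksi risiko psikologis spesifik",
--             "rekomendasi": "Tetap jaga kesehatan mental dengan pola hidup seimbang"
--         })
--     return hasil_prediksi
-- ===== SOURCE B (Python) =====
-- def prediksi_risiko(gejala):
--     # Closed-form specialization: the rule set is fixed and dependency-ordered, so
--     # each rule's firing condition is a boolean formula over the input symptoms.
--     f = set(gejala)
--     r1 = ("insomnia" in f and "kelelahan" in f and "sulit_konsentrasi" in f
--           and "risiko_stres_akademik" not in f)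
--     r2 = ("serangan_cemas" in f and "menghindar" in f and "kelelahan" in f
--           and "risiko_gangguan_kecemasan" not in f)
--     r3 = ("sedih" in f and "kehilangan_minat" in f and "perubahan_nafsu_makan" in f
--           and "tidak_berharga" in f and "risiko_depresi" not in f)
--     r4 = ("pikiran_kematian" in f and "tidak_berharga" in f and "sedih" in f
--           and "risiko_depresi_berat" not in f)
--     r5 = ((r1 or "risiko_stres_akademik" in f)
--           and (r2 or "risiko_gangguan_kecemasan" in f)
--           and "risiko_burnout" not in f)
--     hasil = []
--     if r1:
--         hasil.append({"jenis": "Stres Akademik Tinggi",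
--                       "rekomendasi": "Istirahat cukup, atur jadwal belajar, bicarakan dengan dosen atau teman"})
--     if r2:
--         hasil.append({"jenis": "Gangguan Kecemasan",
--                       "rekomendasi": "Latihan pernapasan, kurangi kafein, pertimbangkan konsultasi psikolog"})
--     if r3:
--         hasil.append({"jenis": "Depresi Ringan-Sedang",
--                       "rekomendasi": "Cari dukungan sosial, pertahankan rutinitas sehat, pertimbangkan konseling"})
--     if r4:
--         hasil.append({"jenis": "Depresi Berat (Segera cari bantuan profesional)",
--                       "rekomendasi": "Segera hubungi psikolog/psikiater atau layanan darurat kesehatan mental"})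
--     if r5:
--         hasil.append({"jenis": "Risiko Burnout Akademik",
--                       "rekomendasi": "Evaluasi beban studi, ambil cuti jika perlu, cari dukungan kampus"})
--     if not hasil:
--         hasil.append({"jenis": "Tidak terdeteksi risiko psikologis spesifik",
--                       "rekomendasi": "Tetap jaga kesehatan mental dengan pola hidup seimbang"})
--     return hasil
-- ===== Notes on version B (the rewrite author's own statement) =====
-- stated objective: simpler
-- what changed: Replaced the while-perubahan fixpoint loop over the rule list by straight-line closed-form code: each rule's firing flag is a boolean formula over symptom membership (the burnout flag referring to the first two flags), with no loop or rule data structure at all.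
import Mathlib
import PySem

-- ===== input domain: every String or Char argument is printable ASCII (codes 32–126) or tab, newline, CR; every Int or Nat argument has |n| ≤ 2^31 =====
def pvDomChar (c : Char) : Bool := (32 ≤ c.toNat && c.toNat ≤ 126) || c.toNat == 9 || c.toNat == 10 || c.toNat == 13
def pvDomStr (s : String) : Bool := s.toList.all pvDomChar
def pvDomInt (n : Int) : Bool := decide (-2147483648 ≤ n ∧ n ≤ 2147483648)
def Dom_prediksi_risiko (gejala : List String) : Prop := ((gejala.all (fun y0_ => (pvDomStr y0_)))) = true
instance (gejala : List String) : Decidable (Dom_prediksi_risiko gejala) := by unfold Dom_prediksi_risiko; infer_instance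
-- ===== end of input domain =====

-- B replaces A's while-fixpoint loop over the rule list by a closed-form straight-line
-- evaluation: since the rule set is fixed and dependency-ordered, each rule's firing
-- condition is a boolean formula over the input symptoms (simpler: no loop at all).


def pvFallback : List (String × String) :=
  [("jenis", "Tidak terdeteksi risiko psikologis spesifik"),
   ("rekomendasi", "Tetap jaga kesehatan mental dengan pola hidup seimbang")]

-- ===== PORT A =====
-- the fixed rule list: (kondisi, kesimpulan, deskripsi, rekomendasi)
def pvAturan : List (List String × String × String × String) :=
  [ (["insomnia", "kelelahan", "sulit_konsentrasi"],
     "risiko_stres_akademik", "Stres Akademik Tinggi",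
     "Istirahat cukup, atur jadwal belajar, bicarakan dengan dosen atau teman"),
    (["serangan_cemas", "menghindar", "kelelahan"],
     "risiko_gangguan_kecemasan", "Gangguan Kecemasan",
     "Latihan pernapasan, kurangi kafein, pertimbangkan konsultasi psikolog"),
    (["sedih", "kehilangan_minat", "perubahan_nafsu_makan", "tidak_berharga"],
     "risiko_depresi", "Depresi Ringan-Sedang",
     "Cari dukungan sosial, pertahankan rutinitas sehat, pertimbangkan konseling"),
    (["pikiran_kematian", "tidak_berharga", "sedih"],
     "risiko_depresi_berat", "Depresi Berat (Segera cari bantuan profesional)",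
     "Segera hubungi psikolog/psikiater atau layanan darurat kesehatan mental"),
    (["risiko_stres_akademik", "risiko_gangguan_kecemasan"],
     "risiko_burnout", "Risiko Burnout Akademik",
     "Evaluasi beban studi, ambil cuti jika perlu, cari dukungan kampus") ]

-- the inner 'for rule in aturan' pass over state (fakta, hasil_prediksi, perubahan);
-- fakta is the Python SET the caller passed (gejala.copy()), so .add is PySem.Set.add
def pvStepA (st : PySem.Set String × List (List (String × String)) × Bool)
    (r : List String × String × String × String) :
    PySem.Set String × List (List (String × String)) × Bool :=
  if PySem.Set.issubset (PySem.Set.ofList r.1) st.1 && !(PySem.Set.contains st.1 r.2.1) then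
    (PySem.Set.add st.1 r.2.1,
     st.2.1 ++ [[("jenis", r.2.2.1), ("rekomendasi", r.2.2.2)]], true)
  else st

def pvForA (rules : List (List String × String × String × String))
    (st : PySem.Set String × List (List (String × String)) × Bool) :
    PySem.Set String × List (List (String × String)) × Bool :=
  rules.foldl pvStepA st

-- 'while perubahan:' — fuel-bounded; each firing pass adds one of the 5 conclusions, so 7 suffices
def pvLoopA : Nat → PySem.Set String → List (List (String × String)) → List (List (String × String))
  | 0, _, hasil => hasil
  | fuel + 1, fakta, hasil =>
    let st := pvForA pvAturan (fakta, hasil, false)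
    if st.2.2 then pvLoopA fuel st.1 st.2.1 else st.2.1

def prediksi_risiko (gejala : List String) : List (List (String × String)) :=
  let hasil := pvLoopA 7 gejala []
  if hasil.isEmpty then [pvFallback] else hasil

-- ===== PORT B =====
-- B: no loop; the five firing flags r1..r5 are boolean formulas over membership in f,
-- r5 referring to r1/r2 because the burnout rule depends on the first two conclusions
def pvHasilB (f : PySem.Set String) : List (List (String × String)) :=
  let r1 := PySem.Set.contains f "insomnia" && PySem.Set.contains f "kelelahan" &&
            PySem.Set.contains f "sulit_konsentrasi" && !PySem.Set.contains f "risiko_stres_akademik"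
  let r2 := PySem.Set.contains f "serangan_cemas" && PySem.Set.contains f "menghindar" &&
            PySem.Set.contains f "kelelahan" && !PySem.Set.contains f "risiko_gangguan_kecemasan"
  let r3 := PySem.Set.contains f "sedih" && PySem.Set.contains f "kehilangan_minat" &&
            PySem.Set.contains f "perubahan_nafsu_makan" && PySem.Set.contains f "tidak_berharga" &&
            !PySem.Set.contains f "risiko_depresi"
  let r4 := PySem.Set.contains f "pikiran_kematian" && PySem.Set.contains f "tidak_berharga" &&
            PySem.Set.contains f "sedih" && !PySem.Set.contains f "risiko_depresi_berat"
  let r5 := (r1 || PySem.Set.contains f "risiko_stres_akademik") &&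
            (r2 || PySem.Set.contains f "risiko_gangguan_kecemasan") &&
            !PySem.Set.contains f "risiko_burnout"
  let h1 := if r1 then [[("jenis", "Stres Akademik Tinggi"),
                         ("rekomendasi", "Istirahat cukup, atur jadwal belajar, bicarakan dengan dosen atau teman")]] else []
  let h2 := if r2 then h1 ++ [[("jenis", "Gangguan Kecemasan"),
                               ("rekomendasi", "Latihan pernapasan, kurangi kafein, pertimbangkan konsultasi psikolog")]] else h1
  let h3 := if r3 then h2 ++ [[("jenis", "Depresi Ringan-Sedang"),
                               ("rekomendasi", "Cari dukungan sosial, pertahankan rutinitas sehat, pertimbangkan konseling")]] else h2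
  let h4 := if r4 then h3 ++ [[("jenis", "Depresi Berat (Segera cari bantuan profesional)"),
                               ("rekomendasi", "Segera hubungi psikolog/psikiater atau layanan darurat kesehatan mental")]] else h3
  let h5 := if r5 then h4 ++ [[("jenis", "Risiko Burnout Akademik"),
                               ("rekomendasi", "Evaluasi beban studi, ambil cuti jika perlu, cari dukungan kampus")]] else h4
  h5

def prediksi_risiko_alt (gejala : List String) : List (List (String × String)) :=
  let hasil := pvHasilB (PySem.Set.ofList gejala)
  if hasil.isEmpty then [pvFallback] else hasil

-- ===== PRECONDITION & SPEC =====
-- gejala is a Python SET; under the type convention its List String carries the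
-- distinct elements, so Pre_ states exactly that shape (no duplicates). Nothing else.
def Pre_prediksi_risiko (gejala : List String) : Prop := gejala.Nodup

instance (gejala : List String) : Decidable (Pre_prediksi_risiko gejala) := by
  unfold Pre_prediksi_risiko; infer_instance

def pvWitness_prediksi_risiko : List String := ["insomnia", "kelelahan", "sulit_konsentrasi"]

def Spec_prediksi_risiko (gejala : List String) (out : List (List (String × String))) : Prop := out = prediksi_risiko_alt gejala
instance (gejala : List String) (out : List (List (String × String))) : Decidable (Spec_prediksi_risiko gejala out) := by unfold Spec_prediksi_risiko; infer_instance

-- ===== CLAIM (what is proved, stated in full; the proofs are below) =====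
def Claim_equal_prediksi_risiko : Prop := ∀ (gejala : List String), Dom_prediksi_risiko gejala → Pre_prediksi_risiko gejala → Spec_prediksi_risiko gejala (prediksi_risiko gejala)

-- ===== LEMMAS AND PROOFS =====

-- (pvStepA st r).1 in closed form
theorem stepA_fst (st : PySem.Set String × List (List (String × String)) × Bool)
    (r : List String × String × String × String) :
    (pvStepA st r).1 =
      if PySem.Set.issubset (PySem.Set.ofList r.1) st.1 && !(PySem.Set.contains st.1 r.2.1)
      then PySem.Set.add st.1 r.2.1 else st.1 := by
  unfold pvStepA; split <;> rfl

-- facts only grow along a pass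
theorem forA_mono (rules : List (List String × String × String × String))
    (st : PySem.Set String × List (List (String × String)) × Bool) (x : String)
    (hx : x ∈ st.1) : x ∈ (pvForA rules st).1 := by
  induction rules generalizing st with
  | nil => exact hx
  | cons r rs ih =>
    have : pvForA (r :: rs) st = pvForA rs (pvStepA st r) := rfl
    rw [this]
    refine ih _ ?_
    rw [stepA_fst]
    split
    · exact (PySem.Set.mem_add _ _ _).mpr (Or.inl hx)
    · exact hx

-- a fact present after a pass was present before or is one of the rules' conclusions
theorem forA_new (rules : List (List String × String × String × String))
    (st : PySem.Set String × List (List (String × String)) × Bool) (x : String)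
    (hx : x ∈ (pvForA rules st).1) : x ∈ st.1 ∨ x ∈ rules.map (fun r => r.2.1) := by
  induction rules generalizing st with
  | nil => exact Or.inl hx
  | cons r rs ih =>
    have : pvForA (r :: rs) st = pvForA rs (pvStepA st r) := rfl
    rw [this] at hx
    rcases ih _ hx with h | h
    · rw [stepA_fst] at h
      by_cases c : (PySem.Set.issubset (PySem.Set.ofList r.1) st.1
          && !(PySem.Set.contains st.1 r.2.1)) = true
      · rw [if_pos c] at h
        rcases (PySem.Set.mem_add _ _ _).mp h with h | h
        · exact Or.inl h
        · exact Or.inr (by simp [h])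
      · rw [if_neg c] at h
        exact Or.inl h
    · exact Or.inr (by simp at h ⊢; tauto)

-- dependency order: no rule's kondisi mentions its own or any LATER rule's conclusion
def pvGood : List (List String × String × String × String) → Prop
  | [] => True
  | r :: rs => r.2.1 ∉ r.1 ∧ (∀ r' ∈ rs, r'.2.1 ∉ r.1) ∧ pvGood rs

-- after one pass every rule whose kondisi holds has its conclusion in the facts
theorem forA_sat (rules : List (List String × String × String × String))
    (st : PySem.Set String × List (List (String × String)) × Bool)
    (hg : pvGood rules) (r : List String × String × String × String) (hr : r ∈ rules)
    (hk : ∀ x ∈ r.1, x ∈ (pvForA rules st).1) : r.2.1 ∈ (pvForA rules st).1 := by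
  induction rules generalizing st with
  | nil => cases hr
  | cons r0 rs ih =>
    obtain ⟨hg1, hg2, hg3⟩ := hg
    have hstep : pvForA (r0 :: rs) st = pvForA rs (pvStepA st r0) := rfl
    rcases List.mem_cons.mp hr with rfl | hr'
    · by_cases c : (PySem.Set.issubset (PySem.Set.ofList r.1) st.1
          && !(PySem.Set.contains st.1 r.2.1)) = true
      · rw [hstep]
        refine forA_mono _ _ _ ?_
        rw [stepA_fst, if_pos c]
        exact (PySem.Set.mem_add _ _ _).mpr (Or.inr rfl)
      · simp only [Bool.and_eq_true, Bool.not_eq_true'] at c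
        by_cases hc : PySem.Set.contains st.1 r.2.1 = true
        · rw [hstep]
          refine forA_mono _ _ _ ?_
          rw [stepA_fst]
          have hm : r.2.1 ∈ st.1 := by simpa [PySem.Set.contains] using hc
          split
          · exact (PySem.Set.mem_add _ _ _).mpr (Or.inl hm)
          · exact hm
        · exfalso
          have hsub : PySem.Set.issubset (PySem.Set.ofList r.1) st.1 = false := by
            rcases Decidable.em (PySem.Set.issubset (PySem.Set.ofList r.1) st.1 = true) with h | h
            · exact absurd ⟨h, by simpa using hc⟩ c
            · exact Bool.eq_false_iff.mpr h
          obtain ⟨x, hx1, hx2⟩ : ∃ x ∈ r.1, x ∉ st.1 := by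
            have := (not_iff_not.mpr (PySem.Set.issubset_iff (PySem.Set.ofList r.1) st.1)).mp
              (by simp [hsub])
            push Not at this
            obtain ⟨x, hx1, hx2⟩ := this
            exact ⟨x, (PySem.Set.mem_ofList _ _).mp hx1, hx2⟩
          have hxfin := hk x hx1
          rw [hstep] at hxfin
          rcases forA_new _ _ _ hxfin with h | h
          · rw [stepA_fst, if_neg (by simp [hsub])] at h
            exact hx2 h
          · obtain ⟨r', hr', he⟩ := List.mem_map.mp h
            exact hg2 r' hr' (he ▸ hx1)
    · rw [hstep] at hk ⊢
      exact ih _ hg3 hr' hk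

-- if every satisfied rule's conclusion is already known, a pass changes nothing
theorem forA_fix (rules : List (List String × String × String × String))
    (f : PySem.Set String) (h : List (List (String × String))) (b : Bool)
    (hs : ∀ r ∈ rules, PySem.Set.issubset (PySem.Set.ofList r.1) f = true → r.2.1 ∈ f) :
    pvForA rules (f, h, b) = (f, h, b) := by
  induction rules with
  | nil => rfl
  | cons r rs ih =>
    have hstep : pvForA (r :: rs) (f, h, b) = pvForA rs (pvStepA (f, h, b) r) := rfl
    have hno : pvStepA (f, h, b) r = (f, h, b) := by
      simp only [pvStepA]
      rw [if_neg]
      simp only [Bool.and_eq_true, Bool.not_eq_true', not_and]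
      intro hsub
      have := hs r (by simp) hsub
      simpa [PySem.Set.contains] using this
    rw [hstep, hno]
    exact ih (fun r' hr' => hs r' (by simp [hr']))

-- the concrete rule list is dependency-ordered
theorem good_pvAturan : pvGood pvAturan := by
  simp only [pvAturan, pvGood]
  refine ⟨by decide, ?_, by decide, ?_, by decide, ?_, by decide, ?_, by decide, by decide, trivial⟩ <;>
    · intro r' hr'
      fin_cases hr' <;> decide

-- after one pass over the (dependency-ordered) rules nothing can fire any more
theorem pass2_fix (gejala : PySem.Set String)
    (hasil : List (List (String × String))) (b : Bool) :
    pvForA pvAturan ((pvForA pvAturan (gejala, [], false)).1, hasil, b)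
      = ((pvForA pvAturan (gejala, [], false)).1, hasil, b) := by
  refine forA_fix _ _ _ _ ?_
  intro r hr hsub
  refine forA_sat pvAturan (gejala, [], false) good_pvAturan r hr ?_
  intro x hx
  exact ((PySem.Set.issubset_iff _ _).mp hsub) x ((PySem.Set.mem_ofList _ _).mpr hx)

-- pushing an if over a set through contains / issubset / add (proof-local rewriting lemmas)
theorem set_ite_contains (c : Prop) [Decidable c] (s t : PySem.Set String) (x : String) :
    PySem.Set.contains (if c then s else t) x
      = if c then PySem.Set.contains s x else PySem.Set.contains t x := by
  split <;> rfl

theorem set_ite_issubset (u : PySem.Set String) (c : Prop) [Decidable c] (s t : PySem.Set String) :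
    PySem.Set.issubset u (if c then s else t)
      = if c then PySem.Set.issubset u s else PySem.Set.issubset u t := by
  split <;> rfl

theorem set_ite_add (c : Prop) [Decidable c] (s t : PySem.Set String) (a : String) :
    PySem.Set.add (if c then s else t) a
      = if c then PySem.Set.add s a else PySem.Set.add t a := by
  split <;> rfl

-- A's first pass produces exactly B's closed-form result list
set_option maxHeartbeats 1600000 in
theorem pass1_hasil (g : PySem.Set String) :
    (pvForA pvAturan (g, [], false)).2.1 = pvHasilB g := by
  simp only [pvForA, pvAturan, List.foldl, pvHasilB, pvStepA]
  simp only [apply_ite (f := (Prod.fst : PySem.Set String × List (List (String × String)) × Bool → PySem.Set String)), apply_ite (f := (Prod.snd : PySem.Set String × List (List (String × String)) × Bool → List (List (String × String)) × Bool)), apply_ite (f := (Prod.fst : List (List (String × String)) × Bool → List (List (String × String))))]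
  simp only [set_ite_contains, set_ite_issubset, set_ite_add]
  have o1 : PySem.Set.ofList ["insomnia", "kelelahan", "sulit_konsentrasi"] = ["insomnia", "kelelahan", "sulit_konsentrasi"] := by decide
  have o2 : PySem.Set.ofList ["serangan_cemas", "menghindar", "kelelahan"] = ["serangan_cemas", "menghindar", "kelelahan"] := by decide
  have o3 : PySem.Set.ofList ["sedih", "kehilangan_minat", "perubahan_nafsu_makan", "tidak_berharga"] = ["sedih", "kehilangan_minat", "perubahan_nafsu_makan", "tidak_berharga"] := by decide
  have o4 : PySem.Set.ofList ["pikiran_kematian", "tidak_berharga", "sedih"] = ["pikiran_kematian", "tidak_berharga", "sedih"] := by decide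
  have o5 : PySem.Set.ofList ["risiko_stres_akademik", "risiko_gangguan_kecemasan"] = ["risiko_stres_akademik", "risiko_gangguan_kecemasan"] := by decide
  simp only [o1, o2, o3, o4, o5]
  simp only [PySem.Set.issubset, PySem.Set.contains, List.all_cons, List.all_nil]
  simp [PySem.Set.mem_add]
  by_cases h1 : ("insomnia" ∈ g ∧ "kelelahan" ∈ g ∧ "sulit_konsentrasi" ∈ g) ∧ "risiko_stres_akademik" ∉ g <;>
  by_cases h2 : ("serangan_cemas" ∈ g ∧ "menghindar" ∈ g ∧ "kelelahan" ∈ g) ∧ "risiko_gangguan_kecemasan" ∉ g <;>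
  by_cases h3 : ("sedih" ∈ g ∧ "kehilangan_minat" ∈ g ∧ "perubahan_nafsu_makan" ∈ g ∧ "tidak_berharga" ∈ g) ∧ "risiko_depresi" ∉ g <;>
  by_cases h4 : ("pikiran_kematian" ∈ g ∧ "tidak_berharga" ∈ g ∧ "sedih" ∈ g) ∧ "risiko_depresi_berat" ∉ g <;>
  by_cases m1 : "risiko_stres_akademik" ∈ g <;>
  by_cases m2 : "risiko_gangguan_kecemasan" ∈ g <;>
  by_cases m5 : "risiko_burnout" ∈ g <;>
  simp_all <;> (try (split_ifs <;> simp_all))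

-- the fuel-bounded while loop returns the first pass's hasil
theorem loopA_eval (g : PySem.Set String) :
    pvLoopA 7 g [] = (pvForA pvAturan (g, [], false)).2.1 := by
  show (let st := pvForA pvAturan (g, [], false);
        if st.2.2 then pvLoopA 6 st.1 st.2.1 else st.2.1)
      = (pvForA pvAturan (g, [], false)).2.1
  by_cases hb : (pvForA pvAturan (g, [], false)).2.2 = true
  · simp only [hb, if_true]
    show (let st := pvForA pvAturan ((pvForA pvAturan (g, [], false)).1,
            (pvForA pvAturan (g, [], false)).2.1, false);
          if st.2.2 then pvLoopA 5 st.1 st.2.1 else st.2.1)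
        = (pvForA pvAturan (g, [], false)).2.1
    rw [pass2_fix]
    rfl
  · simp only [Bool.not_eq_true] at hb
    simp [hb]

-- ===== VERDICT (by name: the statement is the Claim_ definition above) =====
theorem prediksi_risiko_spec : Claim_equal_prediksi_risiko := by
  intro gejala _ hpre
  unfold Spec_prediksi_risiko prediksi_risiko prediksi_risiko_alt
  unfold Pre_prediksi_risiko at hpre
  have hnd : PySem.Set.ofList gejala = gejala :=
    PySem.Set.ofList_eq_self_of_nodup _ hpre
  rw [hnd]
  rw [show pvLoopA 7 gejala [] = pvHasilB gejala from (loopA_eval gejala).trans (pass1_hasil gejala)]
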